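-- pv_equiv track=rewrite | github.com/TrueJacobG/python | PYGAME/sudoku_solver/main.py | GridColor
-- ===== SOURCE A (Python) =====
-- def GridColor(x, y):
--     colors = [(229, 232, 53), (194, 196, 43), (164, 166, 36), (55, 237, 94),
--               (47, 204, 81), (38, 166, 66), (54, 211, 235), (46, 181, 201), (39, 158, 176)]
--     comp = [[0, 1, 2], [3, 4, 5], [6, 7, 8]]
--     for i in range(3):
--         for j in range(3):
--             if x in comp[j] and y in comp[i]:
--                 if j == 0:
--                     return colors[i+j]
--                 if j == 1:
--                     return colors[2+i+j]
--                 else: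
--                     return colors[4+i+j]
-- ===== SOURCE B (Python) =====
-- def GridColor(x, y):
--     colors = [(229, 232, 53), (194, 196, 43), (164, 166, 36), (55, 237, 94),
--               (47, 204, 81), (38, 166, 66), (54, 211, 235), (46, 181, 201), (39, 158, 176)]
--     if 0 <= x < 9 and 0 <= y < 9:
--         return colors[3 * (x // 3) + y // 3]
--     return None
-- ===== Notes on version B (the rewrite author's own statement) =====
-- stated objective: simpler
-- what changed: Replaces the nested 3x3 scan with tuple-membership tests and branchy per-case index math by a single range check and the closed-form index 3*(x//3) + y//3.
import Mathlib
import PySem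

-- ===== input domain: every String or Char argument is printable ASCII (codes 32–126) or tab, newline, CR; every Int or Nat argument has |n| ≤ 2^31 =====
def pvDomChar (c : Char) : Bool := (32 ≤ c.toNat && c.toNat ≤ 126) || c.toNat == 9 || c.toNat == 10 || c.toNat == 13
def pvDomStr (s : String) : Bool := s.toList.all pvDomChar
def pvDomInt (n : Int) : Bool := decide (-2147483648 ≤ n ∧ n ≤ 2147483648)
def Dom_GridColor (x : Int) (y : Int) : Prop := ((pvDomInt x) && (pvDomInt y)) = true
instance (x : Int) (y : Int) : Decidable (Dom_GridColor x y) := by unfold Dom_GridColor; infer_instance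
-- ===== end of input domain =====

-- B replaces A's nested 3×3 scan (tuple membership + per-branch index math) by one range
-- check and the closed-form color index 3*(x//3) + y//3 — objective: simpler.

-- ===== PORT A =====
-- the shared colors list
def pvColors : List (Int × Int × Int) :=
  [(229, 232, 53), (194, 196, 43), (164, 166, 36), (55, 237, 94),
   (47, 204, 81), (38, 166, 66), (54, 211, 235), (46, 181, 201), (39, 158, 176)]

-- the 3x3 comp table
def pvComp : List (List Int) := [[0, 1, 2], [3, 4, 5], [6, 7, 8]]

-- inner 'for j in range(3)' with its early return
def pvInnerA (x : Int) (y : Int) (i : Int) : List Int → Option (Int × Int × Int)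
  | [] => none
  | j :: js =>
    if ((PySem.List.pyGet? pvComp j).getD []).contains x
        && ((PySem.List.pyGet? pvComp i).getD []).contains y then
      if j == 0 then PySem.List.pyGet? pvColors (i + j)
      else if j == 1 then PySem.List.pyGet? pvColors (2 + i + j)
      else PySem.List.pyGet? pvColors (4 + i + j)
    else pvInnerA x y i js

-- outer 'for i in range(3)'; a return from the inner loop returns from the function
def pvOuterA (x : Int) (y : Int) : List Int → Option (Int × Int × Int)
  | [] => none
  | i :: is =>
    match pvInnerA x y i (PySem.List.pyRange 0 3 1) with
    | some c => some c
    | none => pvOuterA x y is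

def GridColor (x : Int) (y : Int) : Option (Int × Int × Int) :=
  pvOuterA x y (PySem.List.pyRange 0 3 1)

-- ===== PORT B =====
def GridColor_alt (x : Int) (y : Int) : Option (Int × Int × Int) :=
  if 0 ≤ x ∧ x < 9 ∧ 0 ≤ y ∧ y < 9 then
    PySem.List.pyGet? pvColors (3 * PySem.Int.floordiv x 3 + PySem.Int.floordiv y 3)
  else none

-- ===== PRECONDITION & SPEC =====
def Spec_GridColor (x : Int) (y : Int) (out : Option (Int × Int × Int)) : Prop := out = GridColor_alt x y
instance (x : Int) (y : Int) (out : Option (Int × Int × Int)) : Decidable (Spec_GridColor x y out) := by unfold Spec_GridColor; infer_instance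

-- ===== CLAIM (what is proved, stated in full; the proofs are below) =====
def Claim_equal_GridColor : Prop := ∀ (x : Int) (y : Int), Dom_GridColor x y → Spec_GridColor x y (GridColor x y)

-- ===== LEMMAS AND PROOFS =====
set_option maxHeartbeats 1000000 in
theorem pvGridColor_key : ∀ a : Nat, a < 9 → ∀ b : Nat, b < 9 →
    GridColor (a : Int) (b : Int) = GridColor_alt (a : Int) (b : Int) := by decide

-- ===== VERDICT (by name: the statement is the Claim_ definition above) =====
theorem GridColor_spec : Claim_equal_GridColor := by
  intro x y _
  unfold Spec_GridColor
  have hr : PySem.List.pyRange 0 3 1 = [0, 1, 2] := by decide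
  by_cases hx : 0 ≤ x ∧ x < 9
  · by_cases hy : 0 ≤ y ∧ y < 9
    · rw [← Int.toNat_of_nonneg hx.1, ← Int.toNat_of_nonneg hy.1]
      exact pvGridColor_key x.toNat (by omega) y.toNat (by omega)
    · have g1 : ¬(y = 0 ∨ y = 1 ∨ y = 2) := by omega
      have g2 : ¬(y = 3 ∨ y = 4 ∨ y = 5) := by omega
      have g3 : ¬(y = 6 ∨ y = 7 ∨ y = 8) := by omega
      rw [GridColor_alt, if_neg (by omega)]
      simp [GridColor, pvOuterA, pvInnerA, hr, pvComp,
            PySem.List.pyGet?, PySem.List.pyIdx?, g1, g2, g3]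
  · have g1 : ¬(x = 0 ∨ x = 1 ∨ x = 2) := by omega
    have g2 : ¬(x = 3 ∨ x = 4 ∨ x = 5) := by omega
    have g3 : ¬(x = 6 ∨ x = 7 ∨ x = 8) := by omega
    rw [GridColor_alt, if_neg (by omega)]
    simp [GridColor, pvOuterA, pvInnerA, hr, pvComp,
          PySem.List.pyGet?, PySem.List.pyIdx?, g1, g2, g3]
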